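-- pv_equiv track=rewrite | github.com/phuayj/biohackathon-germany-2025 | scripts/train_suspicion_gnn.py | _build_hpo_sibling_map_fallback
-- ===== SOURCE A (Python) =====
-- from typing import Dict, Iterable, List, Mapping, Sequence, Tuple
--
-- HPO_SIBLING_GROUPS: tuple[tuple[str, ...], ...] = (
--     (
--         "HP:0001250",
--         "HP:0001257",
--         "HP:0001288",
--         "HP:0001324",
--         "HP:0002376",
--         "HP:0004322",
--     ),
--     (
--         "HP:0002019",
--         "HP:0001629",
--         "HP:0001511",
--         "HP:0001644",
--         "HP:0001658",
--         "HP:0002099",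
--     ),
--     (
--         "HP:0000707",
--         "HP:0000716",
--     ),
--     ("HP:0002013",),
-- )
--
-- def _build_hpo_sibling_map_fallback(phenotype_ids: Sequence[str]) -> Dict[str, list[str]]:
--     """Fallback sibling map based on static groups when HPO is unavailable."""
--     id_set = set(phenotype_ids)
--     sibling_map: Dict[str, list[str]] = {hp_id: [] for hp_id in phenotype_ids}
--     for group in HPO_SIBLING_GROUPS:
--         group_ids = [hp for hp in group if hp in id_set]
--         for hp in group_ids:
--             siblings = [other for other in group_ids if other != hp]
--             sibling_map[hp].extend(siblings)
--     return sibling_map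
-- ===== SOURCE B (Python) =====
-- from typing import Dict, Sequence
--
-- HPO_SIBLING_GROUPS: tuple[tuple[str, ...], ...] = (
--     (
--         "HP:0001250",
--         "HP:0001257",
--         "HP:0001288",
--         "HP:0001324",
--         "HP:0002376",
--         "HP:0004322",
--     ),
--     (
--         "HP:0002019",
--         "HP:0001629",
--         "HP:0001511",
--         "HP:0001644",
--         "HP:0001658",
--         "HP:0002099",
--     ),
--     (
--         "HP:0000707",
--         "HP:0000716",
--     ),
--     ("HP:0002013",),
-- )
--
-- # Inverse index: each HPO id -> the (unique) static group containing it.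
-- _MEMBER_TO_GROUP: Dict[str, tuple] = {
--     hp: group for group in HPO_SIBLING_GROUPS for hp in group
-- }
--
-- def _build_hpo_sibling_map_fallback(phenotype_ids: Sequence[str]) -> Dict[str, list]:
--     id_set = set(phenotype_ids)
--     return {
--         hp: [o for o in _MEMBER_TO_GROUP.get(hp, ()) if o != hp and o in id_set]
--         for hp in phenotype_ids
--     }
-- ===== Notes on version B (the rewrite author's own statement) =====
-- stated objective: simpler
-- what changed: A seeds a dict of empty lists and scatters siblings into it via nested per-group loops with extend; B precomputes a constant inverse index member-to-group once and builds the result in a single dict comprehension over phenotype_ids.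
import Mathlib
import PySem

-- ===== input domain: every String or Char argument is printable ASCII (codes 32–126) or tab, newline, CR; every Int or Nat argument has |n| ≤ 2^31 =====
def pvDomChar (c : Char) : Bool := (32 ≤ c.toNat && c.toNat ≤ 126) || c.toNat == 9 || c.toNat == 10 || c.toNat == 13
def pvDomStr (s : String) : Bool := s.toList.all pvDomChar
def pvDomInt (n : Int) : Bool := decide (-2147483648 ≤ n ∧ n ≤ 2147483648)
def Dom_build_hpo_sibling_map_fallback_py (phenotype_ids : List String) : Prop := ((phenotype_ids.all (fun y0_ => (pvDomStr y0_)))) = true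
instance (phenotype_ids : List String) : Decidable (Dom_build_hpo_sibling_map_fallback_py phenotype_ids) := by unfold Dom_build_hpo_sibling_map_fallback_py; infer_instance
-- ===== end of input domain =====

-- B replaces A's scatter loops (dict of empty lists + per-group extend) by a constant inverse
-- index member→group and a single dict comprehension over phenotype_ids (objective: simpler).

-- ===== PORT A =====
def hpoSiblingGroups : List (List String) :=
  [ ["HP:0001250","HP:0001257","HP:0001288","HP:0001324","HP:0002376","HP:0004322"],
    ["HP:0002019","HP:0001629","HP:0001511","HP:0001644","HP:0001658","HP:0002099"],
    ["HP:0000707","HP:0000716"],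
    ["HP:0002013"] ]

def build_hpo_sibling_map_fallback_py (phenotype_ids : List String) : List (String × List String) :=
  let idSet : PySem.Set String := PySem.Set.ofList phenotype_ids
  let sm0 : PySem.Dict String (List String) :=
    phenotype_ids.foldl (fun d hp => d.insert hp []) PySem.Dict.empty
  (hpoSiblingGroups.foldl (fun d group =>
      let groupIds := group.filter (fun hp => PySem.Set.contains idSet hp)
      groupIds.foldl (fun d hp =>
        d.modify hp [] (fun s => s ++ groupIds.filter (fun other => other != hp))) d) sm0).items

-- ===== PORT B =====
-- inverse index: each HPO id -> the static group containing it (built once from the constant)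
def memberToGroup : PySem.Dict String (List String) :=
  hpoSiblingGroups.foldl (fun d group => group.foldl (fun d hp => d.insert hp group) d)
    PySem.Dict.empty

def build_hpo_sibling_map_fallback_py_alt (phenotype_ids : List String) : List (String × List String) :=
  let idSet : PySem.Set String := PySem.Set.ofList phenotype_ids
  (phenotype_ids.foldl (fun d hp =>
      d.insert hp ((memberToGroup.getD hp []).filter
        (fun o => o != hp && PySem.Set.contains idSet o)))
    PySem.Dict.empty).items

-- ===== PRECONDITION & SPEC =====
def Spec_build_hpo_sibling_map_fallback_py (phenotype_ids : List String) (out : List (String × List String)) : Prop := out = build_hpo_sibling_map_fallback_py_alt phenotype_ids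
instance (phenotype_ids : List String) (out : List (String × List String)) : Decidable (Spec_build_hpo_sibling_map_fallback_py phenotype_ids out) := by unfold Spec_build_hpo_sibling_map_fallback_py; infer_instance

-- ===== CLAIM (what is proved, stated in full; the proofs are below) =====
def Claim_equal_build_hpo_sibling_map_fallback_py : Prop := ∀ (phenotype_ids : List String), Dom_build_hpo_sibling_map_fallback_py phenotype_ids → Spec_build_hpo_sibling_map_fallback_py phenotype_ids (build_hpo_sibling_map_fallback_py phenotype_ids)

-- ===== LEMMAS AND PROOFS =====

-- getD through a fold of inserts whose value depends only on the key
theorem getD_foldl_insert_fn (l : List String) (f : String → List String)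
    (d : PySem.Dict String (List String)) (k : String) (dflt : List String) :
    (l.foldl (fun d hp => d.insert hp (f hp)) d).getD k dflt
      = if k ∈ l then f k else d.getD k dflt := by
  induction l generalizing d with
  | nil => simp
  | cons hp rest ih =>
    simp only [List.foldl_cons, ih, List.mem_cons]
    by_cases hr : k ∈ rest
    · simp [hr]
    · by_cases he : k = hp
      · simp [he, PySem.Dict.getD_insert_self]
      · simp [hr, he, PySem.Dict.getD_insert_of_ne _ _ _ he]

-- getD through one group's modify loop (distinct keys, each extended once)
theorem getD_foldl_modify_ext (l : List String) (sib : String → List String)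
    (d : PySem.Dict String (List String)) (k : String) (hnd : l.Nodup) :
    (l.foldl (fun d hp => d.modify hp [] (fun s => s ++ sib hp)) d).getD k []
      = if k ∈ l then d.getD k [] ++ sib k else d.getD k [] := by
  induction l generalizing d with
  | nil => simp
  | cons hp rest ih =>
    simp only [List.nodup_cons] at hnd
    simp only [List.foldl_cons, ih _ hnd.2, List.mem_cons]
    by_cases hr : k ∈ rest
    · have hne : k ≠ hp := fun h => hnd.1 (h ▸ hr)
      simp [hr, PySem.Dict.getD_modify_of_ne _ _ _ hne]
    · by_cases he : k = hp
      · subst he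
        simp [hr, PySem.Dict.getD_modify_self]
      · simp [hr, he, PySem.Dict.getD_modify_of_ne _ _ _ he]

-- getD through A's outer loop over a list of groups
theorem getD_outer (gs : List (List String)) (p : String → Bool)
    (d : PySem.Dict String (List String)) (k : String)
    (hnd : ∀ g ∈ gs, g.Nodup) :
    (gs.foldl (fun d g =>
        (g.filter p).foldl (fun d hp =>
          d.modify hp [] (fun s => s ++ (g.filter p).filter (fun o => o != hp))) d) d).getD k []
      = d.getD k [] ++
        (gs.map (fun g => if k ∈ g.filter p then (g.filter p).filter (fun o => o != k) else [])).flatten := by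
  induction gs generalizing d with
  | nil => simp
  | cons g rest ih =>
    simp only [List.foldl_cons, List.map_cons, List.flatten_cons]
    rw [ih _ (fun g' hg' => hnd g' (List.mem_cons_of_mem _ hg')),
        getD_foldl_modify_ext _ _ _ _ ((hnd g (List.mem_cons_self)).filter p)]
    by_cases hm : k ∈ g.filter p <;> simp [hm]

theorem keys_invariant (gs : List (List String)) (p : String → Bool)
    (d : PySem.Dict String (List String)) (hsub : ∀ g ∈ gs, ∀ x ∈ g.filter p, x ∈ d.keys) :
    (gs.foldl (fun d g =>
        (g.filter p).foldl (fun d hp =>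
          d.modify hp [] (fun s => s ++ (g.filter p).filter (fun o => o != hp))) d) d).keys
      = d.keys := by
  induction gs generalizing d with
  | nil => rfl
  | cons g rest ih =>
    simp only [List.foldl_cons]
    have hk : ((g.filter p).foldl (fun d hp =>
        d.modify hp [] (fun s => s ++ (g.filter p).filter (fun o => o != hp))) d).keys = d.keys := by
      rw [PySem.Dict.keys_foldl_modify, PySem.Set.update_eq_append_filter]
      have : ((PySem.Set.ofList (g.filter p)).filter
          (fun y => !(PySem.Set.contains d.keys y))) = [] := by
        rw [List.filter_eq_nil_iff]
        intro x hx
        have hx' : x ∈ g.filter p := (PySem.Set.mem_ofList _ _).1 hx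
        have := hsub g List.mem_cons_self x hx'
        simp [PySem.Set.contains_eq_listContains, this]
      rw [this, List.append_nil]
    rw [ih _ (by intro g' hg' x hx; rw [hk]; exact hsub g' (List.mem_cons_of_mem _ hg') x hx), hk]

-- helper list of all ids occurring in the static groups (proof-side only)
def allHpoMembers : List String := ["HP:0001250","HP:0001257","HP:0001288","HP:0001324","HP:0002376","HP:0004322","HP:0002019","HP:0001629","HP:0001511","HP:0001644","HP:0001658","HP:0002099","HP:0000707","HP:0000716","HP:0002013"]

-- pointwise value agreement on keys
theorem value_agree (ids : List String) (k : String) (hk : k ∈ ids) :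
    (hpoSiblingGroups.map (fun g =>
        if k ∈ g.filter (fun hp => PySem.Set.contains (PySem.Set.ofList ids) hp)
        then (g.filter (fun hp => PySem.Set.contains (PySem.Set.ofList ids) hp)).filter (fun o => o != k)
        else [])).flatten
      = (memberToGroup.getD k []).filter
          (fun o => o != k && PySem.Set.contains (PySem.Set.ofList ids) o) := by
  by_cases hmem : k ∈ allHpoMembers
  · simp only [allHpoMembers, List.mem_cons, List.not_mem_nil, or_false] at hmem
    rcases hmem with rfl|rfl|rfl|rfl|rfl|rfl|rfl|rfl|rfl|rfl|rfl|rfl|rfl|rfl|rfl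
    · rw [show memberToGroup.getD "HP:0001250" [] = ["HP:0001250","HP:0001257","HP:0001288","HP:0001324","HP:0002376","HP:0004322"] from by decide]
      simp [hpoSiblingGroups, List.mem_filter, List.filter_filter, hk]
    · rw [show memberToGroup.getD "HP:0001257" [] = ["HP:0001250","HP:0001257","HP:0001288","HP:0001324","HP:0002376","HP:0004322"] from by decide]
      simp [hpoSiblingGroups, List.mem_filter, List.filter_filter, hk]
    · rw [show memberToGroup.getD "HP:0001288" [] = ["HP:0001250","HP:0001257","HP:0001288","HP:0001324","HP:0002376","HP:0004322"] from by decide]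
      simp [hpoSiblingGroups, List.mem_filter, List.filter_filter, hk]
    · rw [show memberToGroup.getD "HP:0001324" [] = ["HP:0001250","HP:0001257","HP:0001288","HP:0001324","HP:0002376","HP:0004322"] from by decide]
      simp [hpoSiblingGroups, List.mem_filter, List.filter_filter, hk]
    · rw [show memberToGroup.getD "HP:0002376" [] = ["HP:0001250","HP:0001257","HP:0001288","HP:0001324","HP:0002376","HP:0004322"] from by decide]
      simp [hpoSiblingGroups, List.mem_filter, List.filter_filter, hk]
    · rw [show memberToGroup.getD "HP:0004322" [] = ["HP:0001250","HP:0001257","HP:0001288","HP:0001324","HP:0002376","HP:0004322"] from by decide]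
      simp [hpoSiblingGroups, List.mem_filter, List.filter_filter, hk]
    · rw [show memberToGroup.getD "HP:0002019" [] = ["HP:0002019","HP:0001629","HP:0001511","HP:0001644","HP:0001658","HP:0002099"] from by decide]
      simp [hpoSiblingGroups, List.mem_filter, List.filter_filter, hk]
    · rw [show memberToGroup.getD "HP:0001629" [] = ["HP:0002019","HP:0001629","HP:0001511","HP:0001644","HP:0001658","HP:0002099"] from by decide]
      simp [hpoSiblingGroups, List.mem_filter, List.filter_filter, hk]
    · rw [show memberToGroup.getD "HP:0001511" [] = ["HP:0002019","HP:0001629","HP:0001511","HP:0001644","HP:0001658","HP:0002099"] from by decide]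
      simp [hpoSiblingGroups, List.mem_filter, List.filter_filter, hk]
    · rw [show memberToGroup.getD "HP:0001644" [] = ["HP:0002019","HP:0001629","HP:0001511","HP:0001644","HP:0001658","HP:0002099"] from by decide]
      simp [hpoSiblingGroups, List.mem_filter, List.filter_filter, hk]
    · rw [show memberToGroup.getD "HP:0001658" [] = ["HP:0002019","HP:0001629","HP:0001511","HP:0001644","HP:0001658","HP:0002099"] from by decide]
      simp [hpoSiblingGroups, List.mem_filter, List.filter_filter, hk]
    · rw [show memberToGroup.getD "HP:0002099" [] = ["HP:0002019","HP:0001629","HP:0001511","HP:0001644","HP:0001658","HP:0002099"] from by decide]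
      simp [hpoSiblingGroups, List.mem_filter, List.filter_filter, hk]
    · rw [show memberToGroup.getD "HP:0000707" [] = ["HP:0000707","HP:0000716"] from by decide]
      simp [hpoSiblingGroups, List.mem_filter, List.filter_filter, hk]
    · rw [show memberToGroup.getD "HP:0000716" [] = ["HP:0000707","HP:0000716"] from by decide]
      simp [hpoSiblingGroups, List.mem_filter, List.filter_filter, hk]
    · rw [show memberToGroup.getD "HP:0002013" [] = ["HP:0002013"] from by decide]
      simp [hpoSiblingGroups, List.mem_filter, List.filter_filter, hk]
  · have hmtg : memberToGroup.getD k [] = [] := by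
      apply PySem.Dict.getD_of_not_contains
      rw [PySem.Dict.contains_eq_decide_mem_keys,
          show memberToGroup.keys = allHpoMembers from by decide]
      exact decide_eq_false hmem
    simp only [allHpoMembers, List.mem_cons, List.not_mem_nil, or_false, not_or] at hmem
    obtain ⟨n1,n2,n3,n4,n5,n6,n7,n8,n9,n10,n11,n12,n13,n14,n15⟩ := hmem
    simp [hpoSiblingGroups, List.mem_filter, hmtg, n1,n2,n3,n4,n5,n6,n7,n8,n9,n10,n11,n12,n13,n14,n15]

-- ===== VERDICT (by name: the statement is the Claim_ definition above) =====
theorem build_hpo_sibling_map_fallback_py_spec : Claim_equal_build_hpo_sibling_map_fallback_py := by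
  intro ids _
  unfold Spec_build_hpo_sibling_map_fallback_py
  unfold build_hpo_sibling_map_fallback_py build_hpo_sibling_map_fallback_py_alt
  simp only []
  have hkeys0 : (ids.foldl (fun d hp => d.insert hp ([] : List String)) PySem.Dict.empty).keys
      = PySem.Set.ofList ids := by
    rw [PySem.Dict.keys_foldl_insert, PySem.Dict.keys_empty, PySem.Set.update_nil_left]
  have hsub : ∀ g ∈ hpoSiblingGroups,
      ∀ x ∈ g.filter (fun hp => PySem.Set.contains (PySem.Set.ofList ids) hp),
      x ∈ (ids.foldl (fun d hp => d.insert hp ([] : List String)) PySem.Dict.empty).keys := by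
    intro g _ x hx
    rw [hkeys0]
    exact (PySem.Set.contains_iff _ _).1 (List.mem_filter.1 hx).2
  have hkeysA := keys_invariant hpoSiblingGroups
    (fun hp => PySem.Set.contains (PySem.Set.ofList ids) hp) _ hsub
  rw [hkeys0] at hkeysA
  have hkeysB : (ids.foldl (fun d hp =>
      d.insert hp ((memberToGroup.getD hp []).filter
        (fun o => o != hp && PySem.Set.contains (PySem.Set.ofList ids) o)))
      PySem.Dict.empty).keys = PySem.Set.ofList ids := by
    rw [PySem.Dict.keys_foldl_insert, PySem.Dict.keys_empty, PySem.Set.update_nil_left]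
  have hndA := hkeysA.symm ▸ PySem.Set.nodup_ofList ids
  have hndB := hkeysB.symm ▸ PySem.Set.nodup_ofList ids
  rw [PySem.Dict.items_eq_map_keys _ hndA [],
      PySem.Dict.items_eq_map_keys _ hndB [],
      hkeysA, hkeysB]
  apply List.map_congr_left
  intro k hkmem
  have hk : k ∈ ids := (PySem.Set.mem_ofList _ _).1 hkmem
  have hvA : (hpoSiblingGroups.foldl (fun d group =>
      ((group.filter (fun hp => PySem.Set.contains (PySem.Set.ofList ids) hp)).foldl
        (fun d hp => d.modify hp [] (fun s => s ++
          (group.filter (fun hp => PySem.Set.contains (PySem.Set.ofList ids) hp)).filter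
            (fun other => other != hp))) d))
      (ids.foldl (fun d hp => d.insert hp ([] : List String)) PySem.Dict.empty)).getD k []
      = (hpoSiblingGroups.map (fun g =>
          if k ∈ g.filter (fun hp => PySem.Set.contains (PySem.Set.ofList ids) hp)
          then (g.filter (fun hp => PySem.Set.contains (PySem.Set.ofList ids) hp)).filter
            (fun o => o != k)
          else [])).flatten := by
    rw [getD_outer _ _ _ _ (by decide), getD_foldl_insert_fn]
    simp
  have hvB : (ids.foldl (fun d hp =>
      d.insert hp ((memberToGroup.getD hp []).filter
        (fun o => o != hp && PySem.Set.contains (PySem.Set.ofList ids) o)))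
      PySem.Dict.empty).getD k []
      = (memberToGroup.getD k []).filter
          (fun o => o != k && PySem.Set.contains (PySem.Set.ofList ids) o) := by
    rw [getD_foldl_insert_fn]
    simp [hk]
  rw [hvA, hvB, value_agree ids k hk]
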